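-- pv_equiv track=rewrite | github.com/asmit404/GFG_Solutions | Sum of upper and lower triangles.py | sumTriangles
-- ===== SOURCE A (Python) =====
-- def sumTriangles(matrix, n):
--     x = y = z = 0
--     for i in range(n):
--         for j in range(i+1, n):
--             x += matrix[i][j]
--     for i in range(n):
--         y += matrix[i][i]
--     for i in range(1, n):
--         for j in range(i):
--             z += matrix[i][j]
--     return [x+y, y+z]
-- ===== SOURCE B (Python) =====
-- def sumTriangles(matrix, n):
--     upper = diag = lower = 0
--     for i in range(n):
--         row = matrix[i]
--         for j in range(n):
--             v = row[j]
--             if i < j: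
--                 upper += v
--             elif j < i:
--                 lower += v
--             else:
--                 diag += v
--     return [upper + diag, diag + lower]
-- ===== Notes on version B (the rewrite author's own statement) =====
-- stated objective: alternative
-- what changed: Replaces A's three differently-shaped partial passes (strict-upper double loop, diagonal loop, strict-lower double loop) with one single full n-by-n sweep that dispatches each element into upper/diagonal/lower accumulators by comparing its indices.
import Mathlib
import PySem

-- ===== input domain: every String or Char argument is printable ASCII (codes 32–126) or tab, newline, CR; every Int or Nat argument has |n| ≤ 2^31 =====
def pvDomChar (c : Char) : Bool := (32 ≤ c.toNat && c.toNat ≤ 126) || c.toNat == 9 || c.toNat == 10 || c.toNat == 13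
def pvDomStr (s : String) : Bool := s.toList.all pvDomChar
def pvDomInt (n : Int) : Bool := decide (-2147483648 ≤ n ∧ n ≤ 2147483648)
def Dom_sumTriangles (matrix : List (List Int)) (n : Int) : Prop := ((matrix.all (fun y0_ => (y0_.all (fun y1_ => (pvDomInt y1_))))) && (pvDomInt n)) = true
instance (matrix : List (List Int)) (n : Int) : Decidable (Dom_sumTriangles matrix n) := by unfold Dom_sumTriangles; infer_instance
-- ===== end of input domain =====

-- B is a single full n×n sweep with branch dispatch instead of A's three partial passes.
-- Equivalence is about the return value; neither version mutates its arguments.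

-- ===== PORT A =====
-- three separate loops: strict upper triangle, diagonal, strict lower triangle
def sumTriangles (matrix : List (List Int)) (n : Int) : List Int :=
  let x := (PySem.List.pyRange 0 n 1).foldl
    (fun x i => (PySem.List.pyRange (i+1) n 1).foldl
      (fun x j => x + PySem.List.pyGetD (PySem.List.pyGetD matrix i []) j 0) x) 0
  let y := (PySem.List.pyRange 0 n 1).foldl
    (fun y i => y + PySem.List.pyGetD (PySem.List.pyGetD matrix i []) i 0) 0
  let z := (PySem.List.pyRange 1 n 1).foldl
    (fun z i => (PySem.List.pyRange 0 i 1).foldl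
      (fun z j => z + PySem.List.pyGetD (PySem.List.pyGetD matrix i []) j 0) z) 0
  [x + y, y + z]

-- ===== PORT B =====
-- one n×n sweep over a triple accumulator (upper, diag, lower), dispatching by index comparison
def sumTriangles_alt (matrix : List (List Int)) (n : Int) : List Int :=
  let s := (PySem.List.pyRange 0 n 1).foldl
    (fun s i =>
      let row := PySem.List.pyGetD matrix i []
      (PySem.List.pyRange 0 n 1).foldl
        (fun s j =>
          let v := PySem.List.pyGetD row j 0
          if i < j then (s.1 + v, s.2.1, s.2.2)
          else if j < i then (s.1, s.2.1, s.2.2 + v)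
          else (s.1, s.2.1 + v, s.2.2)) s)
    ((0 : Int), (0 : Int), (0 : Int))
  [s.1 + s.2.1, s.2.1 + s.2.2]

-- ===== PRECONDITION & SPEC =====
-- Pre_ excludes exactly the inputs on which the Python A raises IndexError:
-- it reads rows 0..n-1 and, in each such row, columns 0..n-1.
def Pre_sumTriangles (matrix : List (List Int)) (n : Int) : Prop :=
  n ≤ matrix.length ∧ ∀ row ∈ matrix.take n.toNat, n ≤ row.length
instance (matrix : List (List Int)) (n : Int) : Decidable (Pre_sumTriangles matrix n) := by
  unfold Pre_sumTriangles; infer_instance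
def pvWitness_sumTriangles : List (List Int) × Int := ([[1, 2], [3, 4]], 2)

def Spec_sumTriangles (matrix : List (List Int)) (n : Int) (out : List Int) : Prop := out = sumTriangles_alt matrix n
instance (matrix : List (List Int)) (n : Int) (out : List Int) : Decidable (Spec_sumTriangles matrix n out) := by unfold Spec_sumTriangles; infer_instance

-- ===== CLAIM (what is proved, stated in full; the proofs are below) =====
def Claim_equal_sumTriangles : Prop := ∀ (matrix : List (List Int)) (n : Int), Dom_sumTriangles matrix n → Pre_sumTriangles matrix n → Spec_sumTriangles matrix n (sumTriangles matrix n)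

-- ===== LEMMAS AND PROOFS =====

-- a fold whose step adds fixed per-element amounts to the three components is a triple of sums
lemma foldl_triple {α : Type} (l : List α) (step : (Int × Int × Int) → α → (Int × Int × Int))
    (p q r : α → Int) (h : ∀ s x, step s x = (s.1 + p x, s.2.1 + q x, s.2.2 + r x))
    (a b c : Int) :
    l.foldl step (a, b, c) = (a + (l.map p).sum, b + (l.map q).sum, c + (l.map r).sum) := by
  induction l generalizing a b c with
  | nil => simp
  | cons x xs ih => simp only [List.foldl_cons, h, List.map_cons, List.sum_cons, ih]; ring_nf

lemma upper_row (f : Int → Int → Int) (n i : Int) (h0 : 0 ≤ i) (hn : i < n) :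
    ((PySem.List.pyRange 0 n 1).map (fun j => if i < j then f i j else 0)).sum
      = ((PySem.List.pyRange (i+1) n 1).map (f i)).sum := by
  rw [PySem.List.pyRange_one_append 0 (i+1) n (by omega) (by omega), List.map_append,
    List.sum_append]
  have h1 : (((PySem.List.pyRange 0 (i+1) 1)).map (fun j => if i < j then f i j else 0)).sum = 0 := by
    apply List.sum_eq_zero; intro x hx
    simp only [List.mem_map] at hx
    obtain ⟨j, hj, rfl⟩ := hx
    have := PySem.List.mem_pyRange_one.mp hj
    rw [if_neg (by omega)]
  rw [h1, zero_add]
  apply congrArg; apply List.map_congr_left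
  intro j hj
  have := PySem.List.mem_pyRange_one.mp hj
  rw [if_pos (by omega)]

lemma diag_row (f : Int → Int → Int) (n i : Int) (h0 : 0 ≤ i) (hn : i < n) :
    ((PySem.List.pyRange 0 n 1).map
        (fun j => if i < j then 0 else if j < i then 0 else f i j)).sum = f i i := by
  rw [PySem.List.pyRange_one_append 0 i n (by omega) (by omega),
    PySem.List.pyRange_one_cons hn, List.map_append, List.sum_append, List.map_cons,
    List.sum_cons]
  have h1 : ((PySem.List.pyRange 0 i 1).map
      (fun j => if i < j then 0 else if j < i then 0 else f i j)).sum = 0 := by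
    apply List.sum_eq_zero; intro x hx
    simp only [List.mem_map] at hx
    obtain ⟨j, hj, rfl⟩ := hx
    have := PySem.List.mem_pyRange_one.mp hj
    rw [if_neg (by omega), if_pos (by omega)]
  have h2 : ((PySem.List.pyRange (i+1) n 1).map
      (fun j => if i < j then 0 else if j < i then 0 else f i j)).sum = 0 := by
    apply List.sum_eq_zero; intro x hx
    simp only [List.mem_map] at hx
    obtain ⟨j, hj, rfl⟩ := hx
    have := PySem.List.mem_pyRange_one.mp hj
    rw [if_pos (by omega)]
  rw [h1, h2]
  simp only [if_neg (lt_irrefl i)]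
  ring

lemma lower_row (f : Int → Int → Int) (n i : Int) (h0 : 0 ≤ i) (hn : i < n) :
    ((PySem.List.pyRange 0 n 1).map
        (fun j => if i < j then 0 else if j < i then f i j else 0)).sum
      = ((PySem.List.pyRange 0 i 1).map (f i)).sum := by
  rw [PySem.List.pyRange_one_append 0 i n (by omega) (by omega), List.map_append,
    List.sum_append]
  have h2 : ((PySem.List.pyRange i n 1).map
      (fun j => if i < j then 0 else if j < i then f i j else 0)).sum = 0 := by
    apply List.sum_eq_zero; intro x hx
    simp only [List.mem_map] at hx
    obtain ⟨j, hj, rfl⟩ := hx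
    have := PySem.List.mem_pyRange_one.mp hj
    by_cases hij : i < j
    · rw [if_pos hij]
    · rw [if_neg hij, if_neg (by omega)]
  rw [h2, add_zero]
  apply congrArg; apply List.map_congr_left
  intro j hj
  have := PySem.List.mem_pyRange_one.mp hj
  rw [if_neg (by omega), if_pos (by omega)]

theorem triangles_eq (matrix : List (List Int)) (n : Int) :
    sumTriangles matrix n = sumTriangles_alt matrix n := by
  unfold sumTriangles sumTriangles_alt
  dsimp only
  -- B: the inner sweep collapses to a triple of sums
  have hB : ∀ (s : Int × Int × Int) (i : Int),
      (PySem.List.pyRange 0 n 1).foldl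
        (fun s j =>
          if i < j then (s.1 + PySem.List.pyGetD (PySem.List.pyGetD matrix i []) j 0, s.2.1, s.2.2)
          else if j < i then (s.1, s.2.1, s.2.2 + PySem.List.pyGetD (PySem.List.pyGetD matrix i []) j 0)
          else (s.1, s.2.1 + PySem.List.pyGetD (PySem.List.pyGetD matrix i []) j 0, s.2.2)) s
      = (s.1 + ((PySem.List.pyRange 0 n 1).map
            (fun j => if i < j then PySem.List.pyGetD (PySem.List.pyGetD matrix i []) j 0 else 0)).sum,
         s.2.1 + ((PySem.List.pyRange 0 n 1).map
            (fun j => if i < j then 0 else if j < i then 0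
              else PySem.List.pyGetD (PySem.List.pyGetD matrix i []) j 0)).sum,
         s.2.2 + ((PySem.List.pyRange 0 n 1).map
            (fun j => if i < j then 0 else if j < i then PySem.List.pyGetD (PySem.List.pyGetD matrix i []) j 0
              else 0)).sum) := by
    intro s i
    have := foldl_triple (PySem.List.pyRange 0 n 1)
      (fun s j =>
        if i < j then (s.1 + PySem.List.pyGetD (PySem.List.pyGetD matrix i []) j 0, s.2.1, s.2.2)
        else if j < i then (s.1, s.2.1, s.2.2 + PySem.List.pyGetD (PySem.List.pyGetD matrix i []) j 0)
        else (s.1, s.2.1 + PySem.List.pyGetD (PySem.List.pyGetD matrix i []) j 0, s.2.2))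
      (fun j => if i < j then PySem.List.pyGetD (PySem.List.pyGetD matrix i []) j 0 else 0)
      (fun j => if i < j then 0 else if j < i then 0
        else PySem.List.pyGetD (PySem.List.pyGetD matrix i []) j 0)
      (fun j => if i < j then 0 else if j < i then PySem.List.pyGetD (PySem.List.pyGetD matrix i []) j 0
        else 0)
      (by intro s j; dsimp only; split_ifs <;> simp) s.1 s.2.1 s.2.2
    simpa using this
  rw [foldl_triple (PySem.List.pyRange 0 n 1) _
    (fun i => ((PySem.List.pyRange 0 n 1).map
      (fun j => if i < j then PySem.List.pyGetD (PySem.List.pyGetD matrix i []) j 0 else 0)).sum)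
    (fun i => ((PySem.List.pyRange 0 n 1).map
      (fun j => if i < j then 0 else if j < i then 0
        else PySem.List.pyGetD (PySem.List.pyGetD matrix i []) j 0)).sum)
    (fun i => ((PySem.List.pyRange 0 n 1).map
      (fun j => if i < j then 0 else if j < i then PySem.List.pyGetD (PySem.List.pyGetD matrix i []) j 0
        else 0)).sum)
    hB 0 0 0]
  -- A: the three loops are three sums
  simp only [PySem.List.foldl_add]
  simp only [zero_add]
  -- rewrite the per-row sums of B into A's partial-range shape
  have hu : ((PySem.List.pyRange 0 n 1).map
      (fun i => ((PySem.List.pyRange 0 n 1).map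
        (fun j => if i < j then PySem.List.pyGetD (PySem.List.pyGetD matrix i []) j 0 else 0)).sum))
      = ((PySem.List.pyRange 0 n 1).map
        (fun i => ((PySem.List.pyRange (i+1) n 1).map
          (fun j => PySem.List.pyGetD (PySem.List.pyGetD matrix i []) j 0)).sum)) := by
    apply List.map_congr_left; intro i hi
    have := PySem.List.mem_pyRange_one.mp hi
    exact upper_row (fun i j => PySem.List.pyGetD (PySem.List.pyGetD matrix i []) j 0) n i
      (by omega) (by omega)
  have hd : ((PySem.List.pyRange 0 n 1).map
      (fun i => ((PySem.List.pyRange 0 n 1).map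
        (fun j => if i < j then 0 else if j < i then 0
          else PySem.List.pyGetD (PySem.List.pyGetD matrix i []) j 0)).sum))
      = ((PySem.List.pyRange 0 n 1).map
        (fun i => PySem.List.pyGetD (PySem.List.pyGetD matrix i []) i 0)) := by
    apply List.map_congr_left; intro i hi
    have := PySem.List.mem_pyRange_one.mp hi
    exact diag_row (fun i j => PySem.List.pyGetD (PySem.List.pyGetD matrix i []) j 0) n i
      (by omega) (by omega)
  have hl : ((PySem.List.pyRange 0 n 1).map
      (fun i => ((PySem.List.pyRange 0 n 1).map
        (fun j => if i < j then 0 else if j < i then PySem.List.pyGetD (PySem.List.pyGetD matrix i []) j 0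
          else 0)).sum)).sum
      = ((PySem.List.pyRange 1 n 1).map
        (fun i => ((PySem.List.pyRange 0 i 1).map
          (fun j => PySem.List.pyGetD (PySem.List.pyGetD matrix i []) j 0)).sum)).sum := by
    have hc : ((PySem.List.pyRange 0 n 1).map
        (fun i => ((PySem.List.pyRange 0 n 1).map
          (fun j => if i < j then 0 else if j < i then PySem.List.pyGetD (PySem.List.pyGetD matrix i []) j 0
            else 0)).sum))
        = ((PySem.List.pyRange 0 n 1).map
          (fun i => ((PySem.List.pyRange 0 i 1).map
            (fun j => PySem.List.pyGetD (PySem.List.pyGetD matrix i []) j 0)).sum)) := by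
      apply List.map_congr_left; intro i hi
      have := PySem.List.mem_pyRange_one.mp hi
      exact lower_row (fun i j => PySem.List.pyGetD (PySem.List.pyGetD matrix i []) j 0) n i
        (by omega) (by omega)
    rw [hc]
    by_cases hn : 0 < n
    · rw [PySem.List.pyRange_one_cons hn, List.map_cons, List.sum_cons]
      simp [PySem.List.pyRange_one_eq_nil (le_refl (0 : Int))]
    · rw [PySem.List.pyRange_one_eq_nil (by omega : n ≤ 0),
        PySem.List.pyRange_one_eq_nil (by omega : n ≤ 1)]
  rw [hu, hd, hl]

-- ===== VERDICT (by name: the statement is the Claim_ definition above) =====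
theorem sumTriangles_spec : Claim_equal_sumTriangles := by
  intro matrix n _ _
  unfold Spec_sumTriangles
  exact triangles_eq matrix n
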